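-- pv_equiv track=rewrite | github.com/AlYousif-dev/neetcode-submissions-5y4jwo9p | Data Structures & Algorithms/largest-3-same-digit-number-in-string/submission-1.py | largestGoodInteger
-- ===== SOURCE A (Python) =====
-- def largestGoodInteger(num: str) -> str:
--     count = {}
--     for i in range(len(num)):
--         if i+2 >= len(num):
--             break
--         if num[i] == num[i+1] and num[i] == num[i+2]:
--             number = num[i]+num[i+1]+num[i+2]
--             count[i] = number
--
--
--
--     if len(count) > 0:
--         return max(count.values())
--     return ""
-- ===== SOURCE B (Python) =====
-- def largestGoodInteger(num: str) -> str:
--     # try candidate characters in descending order; first triple found is the largest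
--     for c in sorted(set(num), reverse=True):
--         if c * 3 in num:
--             return c * 3
--     return ""
-- ===== Notes on version B (the rewrite author's own statement) =====
-- stated objective: simpler
-- what changed: Replaces the index scan that collects every triple in a dict and takes max of its values with a descending enumeration of the string's distinct characters, returning the first c whose triple c*3 occurs as a substring (C-level substring search instead of a per-index Python loop).
import Mathlib
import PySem

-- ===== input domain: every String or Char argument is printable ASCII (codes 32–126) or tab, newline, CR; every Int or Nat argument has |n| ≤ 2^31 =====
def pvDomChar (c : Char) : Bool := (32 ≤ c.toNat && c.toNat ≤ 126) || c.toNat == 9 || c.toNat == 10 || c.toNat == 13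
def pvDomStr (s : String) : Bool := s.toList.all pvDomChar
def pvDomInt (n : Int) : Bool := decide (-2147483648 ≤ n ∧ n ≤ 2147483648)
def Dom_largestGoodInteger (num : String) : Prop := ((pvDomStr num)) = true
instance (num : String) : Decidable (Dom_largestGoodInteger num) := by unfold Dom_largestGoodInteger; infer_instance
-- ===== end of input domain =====

-- B is simpler: it tries the distinct characters in descending order and returns the first
-- triple found as a substring, instead of collecting every triple in a dict and taking max of its values.

-- ===== PORT A =====
-- the for-loop of A, with its early `break` when i+2 >= len(num)
def pvLoopA (l : List Char) (i : Nat) (d : PySem.Dict Int String) : PySem.Dict Int String :=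
  if i < l.length then
    if i + 2 ≥ l.length then d       -- break
    else
      let c0 := l.getD i ' '
      let c1 := l.getD (i+1) ' '
      let c2 := l.getD (i+2) ' '
      let d' := if c0 = c1 ∧ c0 = c2 then d.insert (i : Int) (String.ofList [c0, c1, c2]) else d
      pvLoopA l (i+1) d'
  else d
termination_by l.length - i

def largestGoodInteger (num : String) : String :=
  let count := pvLoopA num.toList 0 (PySem.Dict.mk [])
  if count.values.length > 0 then
    match PySem.List.max? count.values (fun x => x) with
    | some m => m
    | none => ""       -- unreachable: guarded by the length test
  else ""

-- ===== PORT B =====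
-- the for-loop of B over the descending sorted distinct characters
def pvLoopB (l : List Char) : List Char → String
  | [] => ""
  | c :: cs => if PySem.Chars.isIn [c, c, c] l then String.ofList [c, c, c] else pvLoopB l cs

def largestGoodInteger_alt (num : String) : String :=
  pvLoopB num.toList (PySem.List.sorted (PySem.Set.ofList num.toList) (fun x => x) true)

-- ===== PRECONDITION & SPEC =====
def Spec_largestGoodInteger (num : String) (out : String) : Prop := out = largestGoodInteger_alt num
instance (num : String) (out : String) : Decidable (Spec_largestGoodInteger num out) := by unfold Spec_largestGoodInteger; infer_instance

-- ===== CLAIM (what is proved, stated in full; the proofs are below) =====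
def Claim_equal_largestGoodInteger : Prop := ∀ (num : String), Dom_largestGoodInteger num → Spec_largestGoodInteger num (largestGoodInteger num)

-- ===== LEMMAS AND PROOFS =====

lemma tri_lt_tri (c d : Char) : (String.ofList [c,c,c] < String.ofList [d,d,d]) ↔ c < d := by
  rw [String.lt_iff_toList_lt]
  simp only [String.toList_ofList]
  constructor
  · intro h; rcases h with _|_ <;> simp_all
  · intro h; exact List.Lex.rel h

lemma tri_le_tri (c d : Char) : (String.ofList [c,c,c] ≤ String.ofList [d,d,d]) ↔ c ≤ d := by
  rw [← not_lt, ← not_lt, tri_lt_tri]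

lemma getD_drop' (j k : Nat) (l : List Char) (d : Char) : (l.drop j).getD k d = l.getD (j+k) d := by
  simp [List.getD, List.getElem?_drop]

-- [c,c,c] occurs in l iff some position j carries a triple of c
lemma isIn_triple_iff (l : List Char) (c : Char) :
    PySem.Chars.isIn [c, c, c] l = true ↔
      ∃ j, j + 2 < l.length ∧ l.getD j ' ' = c ∧ l.getD (j+1) ' ' = c ∧ l.getD (j+2) ' ' = c := by
  rw [← PySem.Chars.exists_prefix_drop_iff_isIn]
  constructor
  · rintro ⟨j, t, ht⟩
    refine ⟨j, ?_, ?_, ?_, ?_⟩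
    · have := congrArg List.length ht; simp [List.length_drop] at this; omega
    · have := congrArg (fun xs => List.getD xs 0 ' ') ht
      simpa [getD_drop' j 0 l ' '] using this.symm
    · have := congrArg (fun xs => List.getD xs 1 ' ') ht
      simpa [getD_drop' j 1 l ' '] using this.symm
    · have := congrArg (fun xs => List.getD xs 2 ' ') ht
      simpa [getD_drop' j 2 l ' '] using this.symm
  · rintro ⟨j, hj, h0, h1, h2⟩
    refine ⟨j, ?_⟩
    have hlen : 3 ≤ (l.drop j).length := by simp [List.length_drop]; omega
    rcases hd : l.drop j with _ | ⟨a, _ | ⟨b, _ | ⟨e, rest⟩⟩⟩ <;> simp [hd] at hlen ⊢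
    have g0 := getD_drop' j 0 l ' '; have g1 := getD_drop' j 1 l ' '; have g2 := getD_drop' j 2 l ' '
    rw [hd] at g0 g1 g2
    simp [List.getD] at g0 g1 g2
    simp only [List.getD] at h0 h1 h2
    exact ⟨by rw [← h0, g0], by rw [← h1, g1], by rw [← h2, g2]⟩

-- the list of triples A collects, from position i on
def pvTrips (l : List Char) (i : Nat) : List String :=
  if i < l.length then
    if i + 2 ≥ l.length then []
    else
      (if l.getD i ' ' = l.getD (i+1) ' ' ∧ l.getD i ' ' = l.getD (i+2) ' '
       then [String.ofList [l.getD i ' ', l.getD (i+1) ' ', l.getD (i+2) ' ']] else [])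
      ++ pvTrips l (i+1)
  else []
termination_by l.length - i

lemma mem_pvTrips (l : List Char) (i : Nat) (s : String) :
    s ∈ pvTrips l i ↔ ∃ j, i ≤ j ∧ j + 2 < l.length ∧
      l.getD j ' ' = l.getD (j+1) ' ' ∧ l.getD j ' ' = l.getD (j+2) ' ' ∧
      s = String.ofList [l.getD j ' ', l.getD (j+1) ' ', l.getD (j+2) ' '] := by
  fun_induction pvTrips l i with
  | case1 i h1 h2 =>
    simp only [List.not_mem_nil, false_iff]
    rintro ⟨j, hij, hjl, -⟩; omega
  | case2 i h1 h2 ih =>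
    simp only [List.mem_append, ih]
    constructor
    · rintro (hmem | ⟨j, hij, hjl, hc1, hc2, hs⟩)
      · by_cases hc : l.getD i ' ' = l.getD (i+1) ' ' ∧ l.getD i ' ' = l.getD (i+2) ' '
        · rw [if_pos hc] at hmem
          simp at hmem
          exact ⟨i, le_refl i, by omega, hc.1, hc.2, hmem⟩
        · rw [if_neg hc] at hmem; simp at hmem
      · exact ⟨j, by omega, hjl, hc1, hc2, hs⟩
    · rintro ⟨j, hij, hjl, hc1, hc2, hs⟩
      rcases Nat.eq_or_lt_of_le hij with rfl | hlt
      · left; rw [if_pos ⟨hc1, hc2⟩]; simp [hs]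
      · right; exact ⟨j, hlt, hjl, hc1, hc2, hs⟩
  | case3 i h1 =>
    simp only [List.not_mem_nil, false_iff]
    rintro ⟨j, hij, hjl, -⟩; omega

-- the values collected by A's loop are exactly the triples from position i on
lemma pvLoopA_values (l : List Char) : ∀ i d, (∀ j : Nat, i ≤ j → d.contains (j : Int) = false) →
    (pvLoopA l i d).values = d.values ++ pvTrips l i := by
  intro i d
  fun_induction pvLoopA l i d with
  | case1 i d h1 h2 => intro hc; rw [pvTrips]; simp [h1, h2]
  | case2 i d h1 h2 c0 c1 c2 d' ih =>
    intro hc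
    rw [pvTrips, if_pos h1, if_neg (by omega)]
    have hdc : d.contains (i : Int) = false := hc i (le_refl i)
    have hval : d'.values = d.values ++ (if c0 = c1 ∧ c0 = c2 then [String.ofList [c0, c1, c2]] else []) := by
      show (if c0 = c1 ∧ c0 = c2 then d.insert (i : Int) (String.ofList [c0, c1, c2]) else d).values = _
      split_ifs with h
      · simp [PySem.Dict.values, PySem.Dict.items_insert, hdc]
      · simp
    have hc' : ∀ j : Nat, i + 1 ≤ j → d'.contains (j : Int) = false := by
      intro j hj
      show (if c0 = c1 ∧ c0 = c2 then d.insert (i : Int) (String.ofList [c0, c1, c2]) else d).contains (j : Int) = false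
      split_ifs with h
      · rw [PySem.Dict.contains_insert]
        have : ((j : Int) == (i : Int)) = false := by simp; omega
        rw [this]; simpa using hc j (by omega)
      · exact hc j (by omega)
    rw [ih hc', hval]
    simp only [List.append_assoc, c0, c1, c2, List.getD]
  | case3 i d h1 => intro hc; rw [pvTrips]; simp [h1]

-- the canonical middle form: the largest character whose triple occurs in l
def pvMaxGood (l : List Char) : Option Char :=
  PySem.List.max? (l.filter (fun c => PySem.Chars.isIn [c,c,c] l)) (fun x => x)

lemma pvLoopB_spec (l : List Char) : ∀ cs, (∀ c ∈ cs, c ∈ l) → cs.Pairwise (fun a b => b ≤ a) →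
    (∀ c, PySem.Chars.isIn [c,c,c] l = true → c ∈ l → c ∈ cs) →
    pvLoopB l cs = match pvMaxGood l with | none => "" | some m => String.ofList [m,m,m] := by
  intro cs
  induction cs with
  | nil =>
    intro _ _ hcov
    have hnil : l.filter (fun c => PySem.Chars.isIn [c,c,c] l) = [] := by
      rw [List.eq_nil_iff_forall_not_mem]
      intro x hx
      rw [List.mem_filter] at hx
      exact absurd (hcov x hx.2 hx.1) (List.not_mem_nil)
    have : pvMaxGood l = none := by
      rw [pvMaxGood, PySem.List.max?_eq_none_iff, hnil]
    rw [this, pvLoopB]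
  | cons c cs ih =>
    intro hsub hdesc hcov
    by_cases hg : PySem.Chars.isIn [c,c,c] l = true
    · have hcl : c ∈ l := hsub c (by simp)
      have hcg : c ∈ l.filter (fun c => PySem.Chars.isIn [c,c,c] l) := by
        rw [List.mem_filter]; exact ⟨hcl, hg⟩
      rcases hm : pvMaxGood l with - | m
      · rw [pvMaxGood, PySem.List.max?_eq_none_iff] at hm
        rw [hm] at hcg; exact absurd hcg (List.not_mem_nil)
      · have hmem := PySem.List.max?_mem hm
        rw [List.mem_filter] at hmem
        have hmcs : m ∈ c :: cs := hcov m hmem.2 hmem.1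
        have hcm : c ≤ m := PySem.List.max?_isMax hm c hcg
        have hmc : m ≤ c := by
          rcases List.mem_cons.mp hmcs with rfl | hmem'
          · exact le_refl _
          · exact (List.pairwise_cons.mp hdesc).1 m hmem'
        have : m = c := le_antisymm hmc hcm
        subst this
        rw [pvLoopB, if_pos hg]
    · rw [pvLoopB, if_neg hg]
      refine ih (fun x hx => hsub x (List.mem_cons_of_mem _ hx)) (List.pairwise_cons.mp hdesc).2 ?_
      intro x hxg hxl
      rcases List.mem_cons.mp (hcov x hxg hxl) with rfl | hx
      · exact absurd hxg hg
      · exact hx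

lemma B_eq_mid (num : String) :
    largestGoodInteger_alt num = match pvMaxGood num.toList with
      | none => "" | some m => String.ofList [m,m,m] := by
  apply pvLoopB_spec
  · intro c hc
    rw [PySem.List.mem_sorted] at hc
    exact (PySem.Set.mem_ofList _ _).mp hc
  · exact PySem.List.sorted_pairwise_rev _ _
  · intro c _ hcl
    rw [PySem.List.mem_sorted]
    exact (PySem.Set.mem_ofList _ _).mpr hcl

lemma getD_mem_of_lt (l : List Char) (j : Nat) (hj : j < l.length) : l.getD j ' ' ∈ l := by
  have : l.getD j ' ' = l[j] := by simp [List.getD, List.getElem?_eq_getElem hj]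
  rw [this]; exact List.getElem_mem hj

lemma A_eq_mid (num : String) :
    largestGoodInteger num = match pvMaxGood num.toList with
      | none => "" | some m => String.ofList [m,m,m] := by
  set l := num.toList with hl
  have hvals : (pvLoopA l 0 (PySem.Dict.mk [])).values = pvTrips l 0 := by
    have := pvLoopA_values l 0 (PySem.Dict.mk []) (fun j _ => rfl)
    simpa [PySem.Dict.values] using this
  rcases hm : pvMaxGood l with - | m
  · -- no good char: A collects no triple
    have htr : pvTrips l 0 = [] := by
      rw [List.eq_nil_iff_forall_not_mem]
      intro s hs
      rw [mem_pvTrips] at hs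
      rcases hs with ⟨j, -, hjl, hc1, hc2, -⟩
      have hgood : PySem.Chars.isIn [l.getD j ' ', l.getD j ' ', l.getD j ' '] l = true := by
        rw [isIn_triple_iff]
        exact ⟨j, hjl, rfl, hc1.symm, hc2.symm⟩
      rw [pvMaxGood, PySem.List.max?_eq_none_iff] at hm
      have : l.getD j ' ' ∈ l.filter (fun c => PySem.Chars.isIn [c,c,c] l) := by
        rw [List.mem_filter]
        exact ⟨getD_mem_of_lt l j (by omega), hgood⟩
      rw [hm] at this; exact absurd this (List.not_mem_nil)
    rw [largestGoodInteger]
    simp only [← hl, hvals, htr]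
    rfl
  · have hmem := PySem.List.max?_mem hm
    rw [List.mem_filter] at hmem
    have htri : String.ofList [m,m,m] ∈ pvTrips l 0 := by
      rw [mem_pvTrips]
      rcases (isIn_triple_iff l m).mp hmem.2 with ⟨j, hjl, h0, h1, h2⟩
      exact ⟨j, Nat.zero_le j, hjl, by rw [h0, h1], by rw [h0, h2], by rw [h0, h1, h2]⟩
    have hne : pvTrips l 0 ≠ [] := fun h => by rw [h] at htri; exact absurd htri (List.not_mem_nil)
    rcases hs : PySem.List.max? (pvTrips l 0) (fun x => x) with - | s
    · rw [PySem.List.max?_eq_none_iff] at hs; exact absurd hs hne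
    · have hsmem := PySem.List.max?_mem hs
      rw [mem_pvTrips] at hsmem
      rcases hsmem with ⟨j, -, hjl, hc1, hc2, hseq⟩
      have hcgood : PySem.Chars.isIn [l.getD j ' ', l.getD j ' ', l.getD j ' '] l = true := by
        rw [isIn_triple_iff]; exact ⟨j, hjl, rfl, hc1.symm, hc2.symm⟩
      have hcfil : l.getD j ' ' ∈ l.filter (fun c => PySem.Chars.isIn [c,c,c] l) := by
        rw [List.mem_filter]; exact ⟨getD_mem_of_lt l j (by omega), hcgood⟩
      have hcm : l.getD j ' ' ≤ m := PySem.List.max?_isMax hm _ hcfil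
      have hs1 : s ≤ String.ofList [m,m,m] := by
        rw [hseq, ← hc1, ← hc2]
        exact (tri_le_tri _ _).mpr hcm
      have hs2 : String.ofList [m,m,m] ≤ s := PySem.List.max?_isMax hs _ htri
      have hsm : s = String.ofList [m,m,m] := le_antisymm hs1 hs2
      rw [largestGoodInteger]
      simp only [← hl, hvals, hs, hsm]
      rw [if_pos (by simp [List.length_pos_iff]; exact hne)]

-- ===== VERDICT (by name: the statement is the Claim_ definition above) =====
theorem largestGoodInteger_spec : Claim_equal_largestGoodInteger := by
  intro num _
  unfold Spec_largestGoodInteger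
  rw [A_eq_mid, B_eq_mid]
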